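-- pv_equiv track=rewrite | github.com/phil-chp/epitech_projects | tech1/103cipher/extra_utils.py | encoder_key_mat
-- ===== SOURCE A (Python) =====
-- def encoder_key_mat(m, key):
--     s = 0
--     for i in range(len(m)):
--         for j in range(len(m[i])):
--             if s < len(key):
--                 m[i][j] = ord(key[s])
--             else:
--                 m[i][j] = 0
--             s += 1
--     return m
-- ===== SOURCE B (Python) =====
-- def encoder_key_mat(m, key):
--     # Row-wise chunking of the key codes, padded with zeros (return-value
--     # equivalent to A; mutates m by replacing whole rows rather than cells).
--     codes = [ord(c) for c in key]
--     pos = 0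
--     for i, row in enumerate(m):
--         n = len(row)
--         chunk = codes[pos:pos + n]
--         m[i] = chunk + [0] * (n - len(chunk))
--         pos += n
--     return m
-- ===== Notes on version B (the rewrite author's own statement) =====
-- stated objective: idiomatic
-- what changed: B precomputes the key's char codes once and builds each row as one sliced, zero-padded chunk of that list, replacing A's per-cell counter and 's < len(key)' branch with bulk list operations.
import Mathlib
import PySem

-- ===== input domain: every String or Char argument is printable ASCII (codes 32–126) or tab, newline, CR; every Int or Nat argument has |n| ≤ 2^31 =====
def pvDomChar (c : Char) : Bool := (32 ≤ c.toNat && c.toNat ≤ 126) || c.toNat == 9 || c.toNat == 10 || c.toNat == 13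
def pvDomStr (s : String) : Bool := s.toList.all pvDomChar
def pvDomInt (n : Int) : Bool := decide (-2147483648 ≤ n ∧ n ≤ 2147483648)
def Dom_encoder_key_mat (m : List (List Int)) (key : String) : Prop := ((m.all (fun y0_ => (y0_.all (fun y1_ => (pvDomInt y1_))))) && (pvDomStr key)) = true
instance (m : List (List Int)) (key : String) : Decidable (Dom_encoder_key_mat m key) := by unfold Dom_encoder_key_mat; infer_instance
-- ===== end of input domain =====

-- B fills each row by slicing a zero-padded chunk from the precomputed key-code list,
-- instead of A's per-cell counter with an 'if s < len(key)' branch (idiomatic; return value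
-- is the same — A mutates cells in place, B replaces the rows of the same list).

-- ===== PORT A =====
-- per-cell step: s counter, `m[i][j] = ord(key[s]) if s < len(key) else 0`
def pvInnerA (ks : List Char) (st : Nat × List Int) (_cell : Int) : Nat × List Int :=
  let v : Int := if st.1 < ks.length then ((ks.getD st.1 ' ').toNat : Int) else 0
  (st.1 + 1, st.2 ++ [v])

def encoder_key_mat (m : List (List Int)) (key : String) : List (List Int) :=
  (m.foldl (fun (st : Nat × List (List Int)) row =>
      let r := row.foldl (pvInnerA key.toList) (st.1, ([] : List Int))
      (r.1, st.2 ++ [r.2])) (0, ([] : List (List Int)))).2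

-- ===== PORT B =====
-- per-row step: take the next chunk of codes, pad with zeros
def pvStepB (codes : List Int) (st : Nat × List (List Int)) (row : List Int) : Nat × List (List Int) :=
  let n := row.length
  let chunk := (codes.drop st.1).take n
  (st.1 + n, st.2 ++ [chunk ++ List.replicate (n - chunk.length) 0])

def encoder_key_mat_alt (m : List (List Int)) (key : String) : List (List Int) :=
  let codes : List Int := key.toList.map (fun c => (c.toNat : Int))
  (m.foldl (pvStepB codes) (0, ([] : List (List Int)))).2

-- ===== PRECONDITION & SPEC =====
def Spec_encoder_key_mat (m : List (List Int)) (key : String) (out : List (List Int)) : Prop := out = encoder_key_mat_alt m key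
instance (m : List (List Int)) (key : String) (out : List (List Int)) : Decidable (Spec_encoder_key_mat m key out) := by unfold Spec_encoder_key_mat; infer_instance

-- ===== CLAIM (what is proved, stated in full; the proofs are below) =====
def Claim_equal_encoder_key_mat : Prop := ∀ (m : List (List Int)) (key : String), Dom_encoder_key_mat m key → Spec_encoder_key_mat m key (encoder_key_mat m key)

-- ===== LEMMAS AND PROOFS =====

-- A's inner loop over one row, started at counter s, appends exactly B's chunk for that row.
theorem innerA_eq (ks : List Char) (row : List Int) : ∀ (s : Nat) (acc : List Int),
    row.foldl (pvInnerA ks) (s, acc) =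
      (s + row.length,
        acc ++ (((ks.map (fun c => (c.toNat : Int))).drop s).take row.length
          ++ List.replicate (row.length - (((ks.map (fun c => (c.toNat : Int))).drop s).take row.length).length) 0)) := by
  induction row with
  | nil => intro s acc; simp
  | cons a rest ih =>
    intro s acc
    simp only [List.foldl_cons, pvInnerA, ih]
    by_cases h : s < ks.length
    · have hd : (ks.map (fun c => (c.toNat : Int))).drop s
          = ((ks.map (fun c => (c.toNat : Int)))[s]'(by simpa using h))
            :: (ks.map (fun c => (c.toNat : Int))).drop (s + 1) :=
        List.drop_eq_getElem_cons (by simpa using h)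
      simp only [if_pos h, hd, List.take_succ_cons, List.length_cons,
        List.getElem_map, List.getD_eq_getElem ks ' ' h]
      simp [Nat.succ_sub_succ]; omega
    · have hd : (ks.map (fun c => (c.toNat : Int))).drop s = [] :=
        List.drop_eq_nil_of_le (by simpa using Nat.le_of_not_lt h)
      have hd1 : (ks.map (fun c => (c.toNat : Int))).drop (s + 1) = [] :=
        List.drop_eq_nil_of_le (by simp; omega)
      simp only [if_neg h, hd, hd1]
      simp [List.replicate_succ]; omega

-- the two outer folds march in lockstep (same counter, same accumulated rows)
theorem outer_eq (ks : List Char) (m : List (List Int)) : ∀ (s : Nat) (acc : List (List Int)),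
    m.foldl (fun (st : Nat × List (List Int)) row =>
        let r := row.foldl (pvInnerA ks) (st.1, ([] : List Int))
        (r.1, st.2 ++ [r.2])) (s, acc) =
      m.foldl (pvStepB (ks.map (fun c => (c.toNat : Int)))) (s, acc) := by
  induction m with
  | nil => intro s acc; rfl
  | cons row rest ih =>
    intro s acc
    rw [List.foldl_cons, List.foldl_cons]
    have h1 : ((let r := row.foldl (pvInnerA ks) (((s, acc) : Nat × List (List Int)).1, ([] : List Int))
        (r.1, ((s, acc) : Nat × List (List Int)).2 ++ [r.2])) : Nat × List (List Int))
        = pvStepB (ks.map (fun c => (c.toNat : Int))) (s, acc) row := by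
      simp only [innerA_eq, pvStepB, List.nil_append]
    rw [h1]
    exact ih _ _

-- ===== VERDICT (by name: the statement is the Claim_ definition above) =====
theorem encoder_key_mat_spec : Claim_equal_encoder_key_mat := by
  intro m key _
  unfold Spec_encoder_key_mat encoder_key_mat encoder_key_mat_alt
  rw [outer_eq]
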